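-- pv_equiv track=rewrite | github.com/kevin-quiroz/Sintaxis | AguAFD.py | automataMult
-- ===== SOURCE A (Python) =====
-- ESTADO_FINAL = "ESTADO FINAL"
--
-- ESTADO_NO_FINAL = "NO ACEPTADO"
--
-- ESTADO_TRAMPA = "EN ESTADO TRAMPA"
--
-- def automataMult(lexema):
--     estado = 0
--     estadoFinal = [1]
--     for caracter in lexema:
--         if estado == 0 and (caracter == "*" or caracter == "/"):
--             estado = 1
--         else:
--             estado = -1
--             break
--     if estado == -1:
--         return ESTADO_TRAMPA
--     elif estado in estadoFinal:
--         return ESTADO_FINAL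
--     else:
--         return ESTADO_NO_FINAL
-- ===== SOURCE B (Python) =====
-- ESTADO_FINAL = "ESTADO FINAL"
-- ESTADO_NO_FINAL = "NO ACEPTADO"
-- ESTADO_TRAMPA = "EN ESTADO TRAMPA"
--
-- def automataMult(lexema):
--     items = list(lexema)
--     if len(items) == 1 and items[0] in ('*', '/'):
--         return ESTADO_FINAL
--     elif len(items) == 0:
--         return ESTADO_NO_FINAL
--     else:
--         return ESTADO_TRAMPA
-- ===== Notes on version B (the rewrite author's own statement) =====
-- stated objective: simpler
-- what changed: Replaces the state-machine loop over characters with a closed-form classification by length and first character.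
import Mathlib
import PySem

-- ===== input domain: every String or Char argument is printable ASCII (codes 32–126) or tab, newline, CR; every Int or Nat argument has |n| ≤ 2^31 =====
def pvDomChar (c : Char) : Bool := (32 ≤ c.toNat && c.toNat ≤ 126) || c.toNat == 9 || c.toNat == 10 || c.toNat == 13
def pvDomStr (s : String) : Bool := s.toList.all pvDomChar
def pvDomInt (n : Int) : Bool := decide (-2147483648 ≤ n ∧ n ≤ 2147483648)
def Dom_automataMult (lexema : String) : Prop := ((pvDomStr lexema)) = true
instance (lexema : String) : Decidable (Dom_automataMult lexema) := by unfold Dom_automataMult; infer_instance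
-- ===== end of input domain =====

-- B replaces A's character-by-character state machine with a closed-form classification by length and first character (objective: simpler).

-- ===== PORT A =====
-- the for-loop with break: estado threaded through; break modelled by returning -1 immediately
def automataMultLoop : List Char → Int → Int
  | [], estado => estado
  | caracter :: rest, estado =>
    if estado = 0 ∧ (caracter = '*' ∨ caracter = '/') then
      automataMultLoop rest 1
    else
      -1  -- estado = -1; break

def automataMult (lexema : String) : String :=
  let estado := automataMultLoop lexema.toList 0
  if estado = -1 then "EN ESTADO TRAMPA"
  else if estado ∈ [(1 : Int)] then "ESTADO FINAL"
  else "NO ACEPTADO"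

-- ===== PORT B =====
def automataMult_alt (lexema : String) : String :=
  let items := lexema.toList
  if items.length = 1 ∧ (items.head! = '*' ∨ items.head! = '/') then "ESTADO FINAL"
  else if items.length = 0 then "NO ACEPTADO"
  else "EN ESTADO TRAMPA"

-- ===== PRECONDITION & SPEC =====
def Spec_automataMult (lexema : String) (out : String) : Prop := out = automataMult_alt lexema
instance (lexema : String) (out : String) : Decidable (Spec_automataMult lexema out) := by unfold Spec_automataMult; infer_instance

-- ===== CLAIM (what is proved, stated in full; the proofs are below) =====
def Claim_equal_automataMult : Prop := ∀ (lexema : String), Dom_automataMult lexema → Spec_automataMult lexema (automataMult lexema)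

-- ===== LEMMAS AND PROOFS =====
theorem automataMult_eq_alt (lexema : String) :
    automataMult lexema = automataMult_alt lexema := by
  unfold automataMult automataMult_alt
  match h : lexema.toList with
  | [] => simp [automataMultLoop]
  | [c] =>
    by_cases hc : c = '*' ∨ c = '/' <;>
      simp [automataMultLoop, hc]
  | c :: d :: rest =>
    by_cases hc : c = '*' ∨ c = '/' <;>
      simp [automataMultLoop, hc]

-- ===== VERDICT (by name: the statement is the Claim_ definition above) =====
theorem automataMult_spec : Claim_equal_automataMult := by
  intro lexema _
  exact automataMult_eq_alt lexema
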